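-- pv_equiv track=rewrite | github.com/Tristanon/Python-Coding-leetcode- | 2260.Minimum_Consecutive_Cards_to_Pick_Up.py | minimumCardPickup
-- ===== SOURCE A (Python) =====
-- from typing import List
--
-- from collections import defaultdict
-- from collections import defaultdict
--
-- def minimumCardPickup(cards: List[int]) -> int:
--     dic = defaultdict(list)
--     for i in range(len(cards)):
--         dic[cards[i]].append(i)
--
--     ans = float("inf")
--     for key in dic:
--         arr = dic[key]
--         for i in range(len(arr) - 1):
--             ans = min(ans, arr[i + 1] - arr[i] + 1)
--
--     return ans if ans < float("inf") else -1
-- ===== SOURCE B (Python) =====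
-- from typing import List
--
-- def minimumCardPickup(cards: List[int]) -> int:
--     last = {}
--     ans = None
--     for i, v in enumerate(cards):
--         if v in last:
--             d = i - last[v] + 1
--             if ans is None or d < ans:
--                 ans = d
--         last[v] = i
--     return ans if ans is not None else -1
-- ===== Notes on version B (the rewrite author's own statement) =====
-- stated objective: idiomatic
-- what changed: Single pass keeping only the last-seen index of each value in a dict and updating the running minimum gap on the fly, instead of building position lists for every value and then running a second loop over every key and every adjacent pair.
import Mathlib
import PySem

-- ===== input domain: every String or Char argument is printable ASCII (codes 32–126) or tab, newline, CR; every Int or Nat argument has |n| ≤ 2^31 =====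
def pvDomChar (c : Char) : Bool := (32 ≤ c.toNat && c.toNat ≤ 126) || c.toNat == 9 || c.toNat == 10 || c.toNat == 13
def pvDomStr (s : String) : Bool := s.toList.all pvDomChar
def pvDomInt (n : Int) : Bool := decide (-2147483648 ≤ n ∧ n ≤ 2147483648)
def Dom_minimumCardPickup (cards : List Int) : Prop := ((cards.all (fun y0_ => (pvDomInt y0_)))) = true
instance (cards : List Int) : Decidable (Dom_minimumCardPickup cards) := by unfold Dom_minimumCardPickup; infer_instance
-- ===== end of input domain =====

-- B replaces A's per-value position lists plus a second loop over keys/adjacent pairs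
-- by a single pass that keeps only the last-seen index per value (idiomatic; same O(n) cost).

-- ===== PORT A =====
-- Python min(ans, v) with ans starting at float("inf"): none plays the role of inf.
def pvOMin (a : Option Int) (d : Int) : Option Int :=
  match a with
  | none => some d
  | some x => some (min x d)

def minimumCardPickup (cards : List Int) : Int :=
  -- dic = defaultdict(list); for i in range(len(cards)): dic[cards[i]].append(i)
  let dic : PySem.Dict Int (List Int) :=
    (PySem.List.pyRange 0 (PySem.List.len cards)).foldl
      (fun d i => d.modify (PySem.List.pyGetD cards i 0) [] (fun l => l ++ [i]))
      PySem.Dict.empty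
  -- ans = inf; for key in dic: arr = dic[key]; for i in range(len(arr)-1): ans = min(ans, arr[i+1]-arr[i]+1)
  let ans : Option Int :=
    dic.items.foldl
      (fun ans kv =>
        (PySem.List.pyRange 0 (PySem.List.len kv.2 - 1)).foldl
          (fun ans i =>
            pvOMin ans (PySem.List.pyGetD kv.2 (i + 1) 0 - PySem.List.pyGetD kv.2 i 0 + 1))
          ans)
      none
  -- return ans if ans < inf else -1
  match ans with
  | some v => v
  | none => -1

-- ===== PORT B =====
-- one enumerate pass: state = (last-seen dict, best-so-far as Option)
def pvStepB (st : PySem.Dict Int Int × Option Int) (p : Int × Int) : PySem.Dict Int Int × Option Int :=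
  let ans : Option Int :=
    match st.1.get? p.2 with
    | some q =>
      let d := p.1 - q + 1
      match st.2 with
      | none => some d
      | some a => if d < a then some d else some a
    | none => st.2
  (st.1.insert p.2 p.1, ans)

def minimumCardPickup_alt (cards : List Int) : Int :=
  let st := (PySem.List.enumerate cards).foldl pvStepB (PySem.Dict.empty, none)
  match st.2 with
  | some v => v
  | none => -1

-- ===== PRECONDITION & SPEC =====
def Spec_minimumCardPickup (cards : List Int) (out : Int) : Prop := out = minimumCardPickup_alt cards
instance (cards : List Int) (out : Int) : Decidable (Spec_minimumCardPickup cards out) := by unfold Spec_minimumCardPickup; infer_instance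

-- ===== CLAIM (what is proved, stated in full; the proofs are below) =====
def Claim_equal_minimumCardPickup : Prop := ∀ (cards : List Int), Dom_minimumCardPickup cards → Spec_minimumCardPickup cards (minimumCardPickup cards)

-- ===== LEMMAS AND PROOFS =====

-- min on Option Int with none = +inf
def pvObin (a b : Option Int) : Option Int :=
  match a, b with
  | none, b => b
  | some x, none => some x
  | some x, some y => some (min x y)

def pvBigmin (l : List (Option Int)) : Option Int := l.foldl pvObin none

-- A's grouping dict, A's inner minimum over one position list, A's answer
def pvDicA (cards : List Int) : PySem.Dict Int (List Int) :=
  (PySem.List.pyRange 0 (PySem.List.len cards)).foldl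
    (fun d i => d.modify (PySem.List.pyGetD cards i 0) [] (fun l => l ++ [i]))
    PySem.Dict.empty

def pvGm (arr : List Int) : Option Int :=
  (PySem.List.pyRange 0 (PySem.List.len arr - 1)).foldl
    (fun ans i => pvOMin ans (PySem.List.pyGetD arr (i + 1) 0 - PySem.List.pyGetD arr i 0 + 1))
    none

def pvMA (cards : List Int) : Option Int :=
  (pvDicA cards).items.foldl
    (fun ans kv =>
      (PySem.List.pyRange 0 (PySem.List.len kv.2 - 1)).foldl
        (fun ans i =>
          pvOMin ans (PySem.List.pyGetD kv.2 (i + 1) 0 - PySem.List.pyGetD kv.2 i 0 + 1))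
        ans)
    none

-- B's state, and the last index of v in cards
def pvStB (cards : List Int) : PySem.Dict Int Int × Option Int :=
  (PySem.List.enumerate cards).foldl pvStepB (PySem.Dict.empty, none)

def pvLastP (cards : List Int) (v : Int) : Option Int :=
  (PySem.List.enumerate cards).foldl (fun a p => if p.2 = v then some p.1 else a) none

theorem pvObin_none_right (a : Option Int) : pvObin a none = a := by
  cases a <;> rfl

theorem pvObin_assoc (a b c : Option Int) : pvObin (pvObin a b) c = pvObin a (pvObin b c) := by
  cases a <;> cases b <;> cases c <;> simp [pvObin, min_assoc]

theorem pvOMin_eq (a : Option Int) (d : Int) : pvOMin a d = pvObin a (some d) := by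
  cases a <;> rfl

theorem pvFoldl_obin_state (l : List (Option Int)) (a : Option Int) :
    l.foldl pvObin a = pvObin a (pvBigmin l) := by
  induction l generalizing a with
  | nil => simp [pvBigmin, pvObin_none_right]
  | cons x xs ih =>
    simp only [List.foldl_cons, pvBigmin]
    rw [ih (pvObin a x), ih (pvObin none x)]
    rw [show pvObin none x = x from rfl, pvObin_assoc]

theorem pvBigmin_cons (x : Option Int) (l : List (Option Int)) :
    pvBigmin (x :: l) = pvObin x (pvBigmin l) := by
  simp only [pvBigmin, List.foldl_cons]
  rw [pvFoldl_obin_state]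
  rfl

theorem pvBigmin_append (l1 l2 : List (Option Int)) :
    pvBigmin (l1 ++ l2) = pvObin (pvBigmin l1) (pvBigmin l2) := by
  simp only [pvBigmin, List.foldl_append]
  rw [pvFoldl_obin_state]
  rfl

theorem pvFoldl_obin {α : Type} (g : α → Option Int) (l : List α) (a : Option Int) :
    l.foldl (fun a k => pvObin a (g k)) a = pvObin a (pvBigmin (l.map g)) := by
  rw [← List.foldl_map, pvFoldl_obin_state]

-- replace one element of a min-list by something smaller-or-equal-joined: algebra only
theorem pvBigmin_replace (m1 m2 : List (Option Int)) (v w : Option Int) :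
    pvBigmin (m1 ++ pvObin v w :: m2) = pvObin (pvBigmin (m1 ++ v :: m2)) w := by
  rw [pvBigmin_append, pvBigmin_append, pvBigmin_cons, pvBigmin_cons]
  cases pvBigmin m1 <;> cases v <;> cases w <;> cases pvBigmin m2 <;>
    simp [pvObin, min_comm, min_left_comm]

-- pyGetD on an appended list, in-range index
theorem pvPyGetD_append (xs ys : List Int) (i : Int) (d : Int)
    (h0 : 0 ≤ i) (h1 : i < PySem.List.len xs) :
    PySem.List.pyGetD (xs ++ ys) i d = PySem.List.pyGetD xs i d := by
  rw [PySem.List.pyGetD_of_nonneg _ _ h0, PySem.List.pyGetD_of_nonneg _ _ h0]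
  have hlt : i.toNat < xs.length := by
    simp [PySem.List.len] at h1; omega
  rw [List.getD_eq_getElem?_getD, List.getD_eq_getElem?_getD,
      List.getElem?_append_left hlt]

theorem pvPyGetD_append_last (xs : List Int) (y : Int) (d : Int) :
    PySem.List.pyGetD (xs ++ [y]) (PySem.List.len xs) d = y := by
  have h0 : (0:Int) ≤ PySem.List.len xs := by simp [PySem.List.len]
  rw [PySem.List.pyGetD_of_nonneg _ _ h0]
  have : (PySem.List.len xs).toNat = xs.length := by simp [PySem.List.len]
  rw [this, List.getD_eq_getElem?_getD, List.getElem?_append_right (le_refl _)]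
  simp

theorem pvPyRange_self (a : Int) : PySem.List.pyRange a a = [] := by
  apply List.eq_nil_iff_forall_not_mem.mpr
  intro y hy
  have := PySem.List.mem_pyRange_one.mp hy
  omega

-- inner loop = pvObin with pvGm
theorem pvInner_eq (arr : List Int) (a : Option Int) :
    (PySem.List.pyRange 0 (PySem.List.len arr - 1)).foldl
      (fun ans i => pvOMin ans (PySem.List.pyGetD arr (i + 1) 0 - PySem.List.pyGetD arr i 0 + 1)) a
    = pvObin a (pvGm arr) := by
  simp only [pvOMin_eq]
  rw [pvFoldl_obin]
  have h : pvGm arr = pvBigmin ((PySem.List.pyRange 0 (PySem.List.len arr - 1)).map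
      (fun i => some (PySem.List.pyGetD arr (i + 1) 0 - PySem.List.pyGetD arr i 0 + 1))) := by
    rw [pvGm]
    simp only [pvOMin_eq]
    rw [pvFoldl_obin]
    rfl
  rw [h]

-- pvGm on a snoc
theorem pvGm_snoc (arr : List Int) (m : Int) :
    pvGm (arr ++ [m]) = pvObin (pvGm arr) (arr.getLast?.map (fun q => m - q + 1)) := by
  cases harr : arr.getLast? with
  | none =>
    have : arr = [] := by
      cases arr with
      | nil => rfl
      | cons a t => simp at harr
    subst this
    rfl
  | some q =>
    have hne : arr ≠ [] := by
      intro h; subst h; simp at harr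
    have hlp : 0 < arr.length := List.length_pos_of_ne_nil hne
    have hlen : PySem.List.len (arr ++ [m]) - 1 = PySem.List.len arr := by
      simp [PySem.List.len]
    have hlenA : (0:Int) ≤ PySem.List.len arr - 1 := by
      simp only [PySem.List.len]; omega
    have hlenB : PySem.List.len arr - 1 < PySem.List.len arr := by omega
    rw [pvGm, hlen]
    rw [PySem.List.pyRange_one_append 0 (PySem.List.len arr - 1) (PySem.List.len arr) hlenA (by omega)]
    rw [List.foldl_append]
    rw [PySem.List.pyRange_one_cons hlenB]
    rw [show PySem.List.len arr - 1 + 1 = PySem.List.len arr from by omega]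
    rw [pvPyRange_self]
    simp only [List.foldl_cons, List.foldl_nil]
    have hpre : (PySem.List.pyRange 0 (PySem.List.len arr - 1)).foldl
        (fun ans i => pvOMin ans (PySem.List.pyGetD (arr ++ [m]) (i + 1) 0 -
          PySem.List.pyGetD (arr ++ [m]) i 0 + 1)) none = pvGm arr := by
      rw [pvGm]
      apply PySem.List.foldl_congr_mem
      intro acc i hi
      obtain ⟨h1, h2⟩ := PySem.List.mem_pyRange_one.mp hi
      rw [pvPyGetD_append arr [m] i 0 h1 (by omega),
          pvPyGetD_append arr [m] (i + 1) 0 (by omega) (by omega)]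
    rw [hpre]
    rw [show PySem.List.len arr - 1 + 1 = PySem.List.len arr from by omega]
    rw [pvPyGetD_append_last]
    rw [pvPyGetD_append arr [m] (PySem.List.len arr - 1) 0 hlenA hlenB]
    rw [pvOMin_eq]
    have hq : PySem.List.pyGetD arr (PySem.List.len arr - 1) 0 = q := by
      rw [PySem.List.pyGetD_of_nonneg _ _ hlenA]
      have ht : (PySem.List.len arr - 1).toNat = arr.length - 1 := by
        simp only [PySem.List.len]; omega
      rw [ht]
      rw [List.getLast?_eq_getElem?] at harr
      rw [List.getD_eq_getElem?_getD, harr]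
      rfl
    rw [hq]
    rfl

-- pvDicA on a snoc
theorem pvDicA_snoc (cards : List Int) (x : Int) :
    pvDicA (cards ++ [x]) = (pvDicA cards).modify x [] (fun l => l ++ [PySem.List.len cards]) := by
  have hlen : PySem.List.len (cards ++ [x]) = PySem.List.len cards + 1 := by
    simp [PySem.List.len]
  have h0n : (0:Int) ≤ PySem.List.len cards := by simp [PySem.List.len]
  rw [pvDicA, pvDicA, hlen]
  rw [PySem.List.pyRange_one_append 0 (PySem.List.len cards) (PySem.List.len cards + 1) h0n (by omega)]
  rw [List.foldl_append]
  rw [PySem.List.pyRange_one_cons (by omega : PySem.List.len cards < PySem.List.len cards + 1)]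
  rw [pvPyRange_self]
  simp only [List.foldl_cons, List.foldl_nil]
  have hpre : (PySem.List.pyRange 0 (PySem.List.len cards)).foldl
      (fun d i => d.modify (PySem.List.pyGetD (cards ++ [x]) i 0) [] (fun l => l ++ [i]))
      PySem.Dict.empty
    = (PySem.List.pyRange 0 (PySem.List.len cards)).foldl
      (fun d i => d.modify (PySem.List.pyGetD cards i 0) [] (fun l => l ++ [i]))
      PySem.Dict.empty := by
    apply PySem.List.foldl_congr_mem
    intro acc i hi
    obtain ⟨h1, h2⟩ := PySem.List.mem_pyRange_one.mp hi
    rw [pvPyGetD_append cards [x] i 0 h1 h2]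
  rw [hpre, pvPyGetD_append_last]

-- keys of pvDicA
theorem pvKeysA (cards : List Int) : (pvDicA cards).keys = PySem.Set.ofList cards := by
  rw [pvDicA, PySem.Dict.keys_foldl_modify_key _ (fun i => PySem.List.pyGetD cards i 0) [] (fun _ i l => l ++ [i])]
  rw [PySem.List.map_pyGetD_pyRange_zero]
  rfl

theorem pvNodupKeysA (cards : List Int) : (pvDicA cards).keys.Nodup := by
  rw [pvKeysA]; exact PySem.Set.nodup_ofList cards

-- position list of a value
theorem pvPosA_snoc (cards : List Int) (x k : Int) :
    (pvDicA (cards ++ [x])).getD k [] =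
      (pvDicA cards).getD k [] ++ (if k = x then [PySem.List.len cards] else []) := by
  rw [pvDicA_snoc, PySem.Dict.getD_modify]
  by_cases h : k = x
  · subst h; simp
  · simp [h]

theorem pvPosA_empty_of_not_mem (cards : List Int) (k : Int) (h : k ∉ cards) :
    (pvDicA cards).getD k [] = [] := by
  apply PySem.Dict.getD_of_not_contains
  by_contra hc
  have : (pvDicA cards).contains k = true := by
    cases hcc : (pvDicA cards).contains k
    · exact absurd hcc hc
    · rfl
  rw [PySem.Dict.contains_iff_mem_keys, pvKeysA, PySem.Set.mem_ofList] at this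
  exact h this

-- lastP on a snoc
theorem pvLastP_snoc (cards : List Int) (x v : Int) :
    pvLastP (cards ++ [x]) v = if x = v then some (PySem.List.len cards) else pvLastP cards v := by
  rw [pvLastP, PySem.List.enumerate_append, List.foldl_append]
  simp [pvLastP, PySem.List.enumerate, PySem.List.len]

theorem pvLastP_none_of_not_mem (cards : List Int) (v : Int) (h : v ∉ cards) :
    pvLastP cards v = none := by
  induction cards using List.reverseRecOn with
  | nil => rfl
  | append_singleton xs x ih =>
    rw [pvLastP_snoc]
    have hxv : x ≠ v := fun e => h (by simp [e])
    rw [if_neg hxv]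
    exact ih (fun hm => h (by simp [hm]))

-- getLast? of the position list is lastP
theorem pvPosA_getLast (cards : List Int) (k : Int) :
    ((pvDicA cards).getD k []).getLast? = pvLastP cards k := by
  induction cards using List.reverseRecOn with
  | nil => rfl
  | append_singleton xs x ih =>
    rw [pvPosA_snoc, pvLastP_snoc]
    by_cases hk : k = x
    · subst hk; simp
    · rw [if_neg hk, if_neg (fun h => hk h.symm)]
      simpa using ih

-- A's answer as a big min over keys
theorem pvMA_eq_bigmin (cards : List Int) :
    pvMA cards = pvBigmin ((PySem.Set.ofList cards).map (fun k => pvGm ((pvDicA cards).getD k []))) := by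
  rw [pvMA]
  rw [show (pvDicA cards).items = (pvDicA cards).keys.map (fun k => (k, (pvDicA cards).getD k []))
      from PySem.Dict.items_eq_map_keys _ (pvNodupKeysA cards) []]
  rw [List.foldl_map]
  have : ∀ (a : Option Int), ((pvDicA cards).keys).foldl
      (fun ans k =>
        (PySem.List.pyRange 0 (PySem.List.len ((pvDicA cards).getD k []) - 1)).foldl
          (fun ans i => pvOMin ans (PySem.List.pyGetD ((pvDicA cards).getD k []) (i + 1) 0 -
            PySem.List.pyGetD ((pvDicA cards).getD k []) i 0 + 1)) ans) a
      = pvObin a (pvBigmin (((pvDicA cards).keys).map (fun k => pvGm ((pvDicA cards).getD k [])))) := by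
    intro a
    rw [← pvFoldl_obin (fun k => pvGm ((pvDicA cards).getD k []))]
    apply PySem.List.foldl_congr_mem
    intro acc k _
    exact pvInner_eq _ acc
  rw [this none, pvKeysA]
  rfl

theorem pvOfList_snoc (cards : List Int) (x : Int) :
    PySem.Set.ofList (cards ++ [x]) =
      if x ∈ cards then PySem.Set.ofList cards else PySem.Set.ofList cards ++ [x] := by
  rw [show PySem.Set.ofList (cards ++ [x]) = List.foldl PySem.Set.add PySem.Set.empty (cards ++ [x]) from rfl]
  rw [List.foldl_append]
  simp only [List.foldl_cons, List.foldl_nil]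
  rw [show List.foldl PySem.Set.add PySem.Set.empty cards = PySem.Set.ofList cards from rfl]
  rw [PySem.Set.add]
  by_cases hx : x ∈ cards
  · rw [if_pos, if_pos hx]
    exact List.contains_iff_mem.mpr ((PySem.Set.mem_ofList cards x).mpr hx)
  · rw [if_neg, if_neg hx]
    intro hc
    exact hx ((PySem.Set.mem_ofList cards x).mp (List.contains_iff_mem.mp hc))

-- the changed-key entry of the new dict
theorem pvG'_eq (cards : List Int) (x k : Int) (hk : k ≠ x) :
    pvGm ((pvDicA (cards ++ [x])).getD k []) = pvGm ((pvDicA cards).getD k []) := by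
  rw [pvPosA_snoc, if_neg hk, List.append_nil]

-- A's recurrence
theorem pvMA_snoc (cards : List Int) (x : Int) :
    pvMA (cards ++ [x]) = pvObin (pvMA cards)
      ((pvLastP cards x).map (fun q => PySem.List.len cards - q + 1)) := by
  rw [pvMA_eq_bigmin, pvMA_eq_bigmin, pvOfList_snoc]
  by_cases hx : x ∈ cards
  · rw [if_pos hx]
    obtain ⟨l1, l2, hK⟩ := List.append_of_mem ((PySem.Set.mem_ofList cards x).mpr hx)
    rw [hK]
    simp only [List.map_append, List.map_cons]
    have hgx : pvGm ((pvDicA (cards ++ [x])).getD x []) =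
        pvObin (pvGm ((pvDicA cards).getD x []))
          ((pvLastP cards x).map (fun q => PySem.List.len cards - q + 1)) := by
      rw [pvPosA_snoc, if_pos rfl, pvGm_snoc, pvPosA_getLast]
    rw [hgx]
    have hmap : ∀ l : List Int, x ∉ l →
        l.map (fun k => pvGm ((pvDicA (cards ++ [x])).getD k [])) =
        l.map (fun k => pvGm ((pvDicA cards).getD k [])) := by
      intro l hl
      apply List.map_congr_left
      intro k hkmem
      exact pvG'_eq cards x k (fun he => hl (he ▸ hkmem))
    have hnd : (l1 ++ x :: l2).Nodup := hK ▸ PySem.Set.nodup_ofList cards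
    have hx1 : x ∉ l1 := by
      intro hm
      exact (List.disjoint_of_nodup_append hnd) hm (List.mem_cons_self)
    have hx2 : x ∉ l2 := by
      have := (List.nodup_append.mp hnd).2.1
      exact (List.nodup_cons.mp this).1
    rw [hmap l1 hx1, hmap l2 hx2]
    exact pvBigmin_replace _ _ _ _
  · rw [if_neg hx]
    rw [pvLastP_none_of_not_mem cards x hx]
    simp only [Option.map_none]
    rw [pvObin_none_right]
    rw [List.map_append, List.map_singleton]
    have hgx : pvGm ((pvDicA (cards ++ [x])).getD x []) = none := by
      rw [pvPosA_snoc, if_pos rfl, pvPosA_empty_of_not_mem cards x hx]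
      rfl
    rw [hgx]
    have hmap : (PySem.Set.ofList cards).map (fun k => pvGm ((pvDicA (cards ++ [x])).getD k [])) =
        (PySem.Set.ofList cards).map (fun k => pvGm ((pvDicA cards).getD k [])) := by
      apply List.map_congr_left
      intro k hkmem
      have hkc : k ∈ cards := (PySem.Set.mem_ofList cards k).mp hkmem
      exact pvG'_eq cards x k (fun he => hx (he ▸ hkc))
    rw [hmap, pvBigmin_append]
    rw [show pvBigmin [(none : Option Int)] = none from rfl]
    rw [pvObin_none_right]

-- B's dict state
theorem pvStB_fst (cards : List Int) (v : Int) :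
    (pvStB cards).1.get? v = pvLastP cards v := by
  induction cards using List.reverseRecOn with
  | nil => rfl
  | append_singleton xs x ih =>
    rw [pvStB, PySem.List.enumerate_append, List.foldl_append, pvLastP_snoc]
    simp only [PySem.List.enumerate, List.foldl_cons, List.foldl_nil]
    rw [show (List.foldl pvStepB (PySem.Dict.empty, none) (PySem.List.enumerate xs 0)) = pvStB xs from rfl]
    rw [show (pvStepB (pvStB xs) (0 + ↑xs.length, x)).1 = (pvStB xs).1.insert x (0 + ↑xs.length) from rfl]
    rw [PySem.Dict.get?_insert]
    by_cases hv : v = x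
    · subst hv; simp [PySem.List.len]
    · rw [if_neg hv, if_neg (fun h => hv h.symm)]
      exact ih

-- B's recurrence
theorem pvStB_snoc_snd (cards : List Int) (x : Int) :
    (pvStB (cards ++ [x])).2 = pvObin ((pvStB cards).2)
      ((pvLastP cards x).map (fun q => PySem.List.len cards - q + 1)) := by
  rw [pvStB, PySem.List.enumerate_append]
  rw [show PySem.List.enumerate [x] (0 + (cards.length : Int)) = [(0 + (cards.length : Int), x)] from rfl]
  rw [List.foldl_append]
  simp only [List.foldl_cons, List.foldl_nil]
  rw [show (List.foldl pvStepB (PySem.Dict.empty, none) (PySem.List.enumerate cards 0)) = pvStB cards from rfl]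
  show (pvStepB (pvStB cards) (0 + (cards.length : Int), x)).2 = _
  simp only [pvStepB]
  rw [pvStB_fst]
  have hlen : 0 + (cards.length : Int) = PySem.List.len cards := by
    simp [PySem.List.len]
  cases hlp : pvLastP cards x with
  | none => simp [pvObin_none_right]
  | some q =>
    simp only [Option.map_some]
    cases hans : (pvStB cards).2 with
    | none => simp [pvObin, hlen]
    | some a =>
      simp only [hlen, pvObin]
      split_ifs with h
      · simp [min_def]; omega
      · simp [min_def]; omega

-- the two answers agree
theorem pvMain (cards : List Int) : pvMA cards = (pvStB cards).2 := by
  induction cards using List.reverseRecOn with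
  | nil => rfl
  | append_singleton xs x ih =>
    rw [pvMA_snoc, pvStB_snoc_snd, ih]

-- ===== VERDICT (by name: the statement is the Claim_ definition above) =====
theorem minimumCardPickup_spec : Claim_equal_minimumCardPickup := by
  intro cards _
  unfold Spec_minimumCardPickup
  have hA : minimumCardPickup cards =
      (match pvMA cards with | some v => v | none => -1) := rfl
  have hB : minimumCardPickup_alt cards =
      (match (pvStB cards).2 with | some v => v | none => -1) := rfl
  rw [hA, hB, pvMain]
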